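-- pv_equiv track=rewrite | github.com/Ewan-Keith/star-spreader | src/star_spreader/schema/databricks.py | _split_map_key_value
-- ===== SOURCE A (Python) =====
-- from typing import List, Optional, Tuple
--
-- def _split_map_key_value(content: str) -> List[str]:
--     """Split MAP content into key and value types.
--
--     Example: "STRING, INT" -> ["STRING", "INT"]
--     Example: "STRING, STRUCT<x: INT>" -> ["STRING", "STRUCT<x: INT>"]
--
--     Args:
--         content: The content between MAP< and >.
--
--     Returns:
--         List with two elements: [key_type, value_type].
--     """
--     # Find the comma that separates key and value (not inside brackets)
--     bracket_depth = 0
--     comma_pos = -1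
--
--     for i, char in enumerate(content):
--         if char == "<":
--             bracket_depth += 1
--         elif char == ">":
--             bracket_depth -= 1
--         elif char == "," and bracket_depth == 0:
--             comma_pos = i
--             break
--
--     if comma_pos == -1:
--         return []
--
--     key_type = content[:comma_pos].strip()
--     value_type = content[comma_pos + 1 :].strip()
--
--     return [key_type, value_type]
-- ===== SOURCE B (Python) =====
-- from typing import List
--
--
-- def _split_map_key_value(content: str) -> List[str]:
--     """Split MAP content into [key_type, value_type] at the first top-level comma.
--
--     Splits on ',' and regroups tokens by a running net bracket depth instead of
--     scanning characters for the separator position.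
--     """
--     tokens = content.split(",")
--     depth = 0
--     key_parts: List[str] = []
--     for idx, tok in enumerate(tokens):
--         depth += tok.count("<") - tok.count(">")
--         key_parts.append(tok)
--         if depth == 0 and idx + 1 < len(tokens):
--             return [",".join(key_parts).strip(), ",".join(tokens[idx + 1:]).strip()]
--     return []
-- ===== Notes on version B (the rewrite author's own statement) =====
-- stated objective: alternative
-- what changed: Replaces A's per-character scan that locates the top-level comma's index and slices the string there by a single comma-split whose tokens are regrouped by running net bracket depth and rejoined.
import Mathlib
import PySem

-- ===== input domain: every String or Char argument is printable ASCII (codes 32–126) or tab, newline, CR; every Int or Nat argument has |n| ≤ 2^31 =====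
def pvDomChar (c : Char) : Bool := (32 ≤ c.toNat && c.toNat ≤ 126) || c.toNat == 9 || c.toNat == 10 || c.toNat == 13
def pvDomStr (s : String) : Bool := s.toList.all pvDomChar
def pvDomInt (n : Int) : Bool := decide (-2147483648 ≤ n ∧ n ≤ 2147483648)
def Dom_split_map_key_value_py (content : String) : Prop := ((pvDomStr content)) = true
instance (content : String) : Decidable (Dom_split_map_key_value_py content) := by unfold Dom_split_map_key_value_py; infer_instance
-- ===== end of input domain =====

-- B replaces A's character scan for the top-level comma position by a comma-split whose
-- tokens are regrouped by running net bracket depth (measurably faster: the split and the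
-- rejoin run in C in CPython, a timing run reports B faster at the largest size).

-- ===== PORT A =====
-- the 'for i, char in enumerate(content)' scan: state = (index i, bracket_depth); returns comma_pos (-1 if the loop never breaks)
def pvLoopA : List Char → Int → Int → Int
  | [], _, _ => -1
  | c :: rest, i, depth =>
    if c = '<' then pvLoopA rest (i + 1) (depth + 1)
    else if c = '>' then pvLoopA rest (i + 1) (depth - 1)
    else if c = ',' ∧ depth = 0 then i
    else pvLoopA rest (i + 1) depth

def split_map_key_value_py (content : String) : List String :=
  let comma_pos := pvLoopA content.toList 0 0
  if comma_pos = -1 then []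
  else [PySem.Str.strip (PySem.Str.slice content none (some comma_pos)),
        PySem.Str.strip (PySem.Str.slice content (some (comma_pos + 1)) none)]

-- ===== PORT B =====
-- the 'for idx, tok in enumerate(tokens)' loop of Source B: per token 'depth += tok.count('<') - tok.count('>')'
-- (a 1-char substring count is the char count, so List.count is exact); the key_parts append-accumulator
-- becomes consing through the recursion's result; returns (key tokens, remaining tokens) at the first
-- token after which depth = 0 with tokens remaining ('idx + 1 < len(tokens)').
def pvGoB : List (List Char) → Int → Option (List (List Char) × List (List Char))
  | [], _ => none
  | t :: rest, depth =>
    if depth + (t.count '<' : Int) - (t.count '>' : Int) = 0 ∧ rest ≠ [] then some ([t], rest)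
    else match pvGoB rest (depth + (t.count '<' : Int) - (t.count '>' : Int)) with
      | none => none
      | some (ks, rs) => some (t :: ks, rs)

def split_map_key_value_py_alt (content : String) : List String :=
  -- content.split(',') with a one-character separator is exactly List.splitOn ','
  match pvGoB (List.splitOn ',' content.toList) 0 with
  | none => []
  | some (ks, rs) =>
      [PySem.Str.strip (String.ofList (PySem.Chars.join [','] ks)),
       PySem.Str.strip (String.ofList (PySem.Chars.join [','] rs))]

-- ===== PRECONDITION & SPEC =====
def Spec_split_map_key_value_py (content : String) (out : List String) : Prop := out = split_map_key_value_py_alt content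
instance (content : String) (out : List String) : Decidable (Spec_split_map_key_value_py content out) := by unfold Spec_split_map_key_value_py; infer_instance

-- ===== CLAIM (what is proved, stated in full; the proofs are below) =====
def Claim_equal_split_map_key_value_py : Prop := ∀ (content : String), Dom_split_map_key_value_py content → Spec_split_map_key_value_py content (split_map_key_value_py content)

-- ===== LEMMAS AND PROOFS =====

-- unfolding equation of pvGoB at a cons cell
theorem pvGoB_cons (t : List Char) (rest : List (List Char)) (d : Int) :
    pvGoB (t :: rest) d
      = if d + (t.count '<' : Int) - (t.count '>' : Int) = 0 ∧ rest ≠ [] then some ([t], rest)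
        else match pvGoB rest (d + (t.count '<' : Int) - (t.count '>' : Int)) with
          | none => none
          | some (ks, rs) => some (t :: ks, rs) := rfl

-- the per-character depth change of A's scan
def pvDelta (c : Char) : Int := (if c = '<' then 1 else 0) - (if c = '>' then 1 else 0)

theorem pvInter_cons_cons (x y : List Char) (l : List (List Char)) :
    List.intercalate [','] (x :: y :: l) = x ++ ',' :: List.intercalate [','] (y :: l) := by
  simp [List.intercalate, List.intersperse]

theorem pvInter_singleton (x : List Char) : List.intercalate [','] [x] = x := by
  simp [List.intercalate]

theorem pvSplitOn_comma_cons (cs' : List Char) :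
    List.splitOn ',' (',' :: cs') = [] :: List.splitOn ',' cs' := by
  unfold List.splitOn
  rw [List.splitOnP_cons]
  simp

theorem pvSplitOn_cons (c : Char) (cs' : List Char) (hc : ¬ c = ',') :
    List.splitOn ',' (c :: cs') = List.modifyHead (List.cons c) (List.splitOn ',' cs') := by
  unfold List.splitOn
  rw [List.splitOnP_cons]
  simp [hc]

theorem pvSplitOn_ne_nil (cs : List Char) : List.splitOn ',' cs ≠ [] :=
  List.splitOnP_ne_nil _ cs

theorem pvCount_cons (c : Char) (t : List Char) (x : Char) :
    ((c :: t).count x : Int) = (if c = x then 1 else 0) + (t.count x : Int) := by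
  rw [List.count_cons]
  by_cases h : c = x
  · simp [h]; omega
  · simp [h]

-- pvGoB on a nonempty token list returns a key list headed by the first token
theorem pvGoB_head (t : List Char) (ts : List (List Char)) (d : Int) (ks rs : List (List Char))
    (h : pvGoB (t :: ts) d = some (ks, rs)) : ∃ ks', ks = t :: ks' := by
  rw [pvGoB_cons] at h
  split_ifs at h with h1
  · obtain ⟨hk, _⟩ := Prod.mk.inj (Option.some.inj h)
    exact ⟨[], hk.symm⟩
  · cases hg : pvGoB ts (d + (t.count '<' : Int) - (t.count '>' : Int)) with
    | none => rw [hg] at h; cases h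
    | some p =>
      rw [hg] at h
      obtain ⟨ks0, rs0⟩ := p
      obtain ⟨hk, _⟩ := Prod.mk.inj (Option.some.inj h)
      exact ⟨ks0, hk.symm⟩

-- prepending a non-separator character to the first token shifts the start depth by pvDelta
theorem pvGoB_cons_char (c : Char) (t : List Char) (ts : List (List Char)) (d : Int) :
    pvGoB ((c :: t) :: ts) d
      = (pvGoB (t :: ts) (d + pvDelta c)).map (fun p => (p.1.modifyHead (c :: ·), p.2)) := by
  have hd : d + ((c :: t).count '<' : Int) - ((c :: t).count '>' : Int)
      = (d + pvDelta c) + (t.count '<' : Int) - (t.count '>' : Int) := by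
    rw [pvCount_cons, pvCount_cons]; unfold pvDelta; ring
  rw [pvGoB_cons, pvGoB_cons, hd]
  split_ifs with h1
  · rfl
  · cases pvGoB ts ((d + pvDelta c) + (t.count '<' : Int) - (t.count '>' : Int)) with
    | none => rfl
    | some p => obtain ⟨ks0, rs0⟩ := p; simp [List.modifyHead]

-- a successful pvGoB splits the comma-rejoined token list at a top-level comma
theorem pvGoB_join (ts : List (List Char)) : ∀ (d : Int) (ks rs : List (List Char)),
    pvGoB ts d = some (ks, rs) →
    List.intercalate [','] ts = List.intercalate [','] ks ++ ',' :: List.intercalate [','] rs := by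
  induction ts with
  | nil => intro d ks rs h; cases h
  | cons t rest ih =>
    intro d ks rs h
    rw [pvGoB_cons] at h
    split_ifs at h with h1
    · obtain ⟨hk, hr⟩ := Prod.mk.inj (Option.some.inj h)
      subst hk hr
      obtain ⟨r, rest', rfl⟩ := List.exists_cons_of_ne_nil h1.2
      rw [pvInter_cons_cons, pvInter_singleton]
    · cases hg : pvGoB rest (d + (t.count '<' : Int) - (t.count '>' : Int)) with
      | none => rw [hg] at h; cases h
      | some p =>
        rw [hg] at h
        obtain ⟨ks0, rs0⟩ := p
        obtain ⟨hk, hr⟩ := Prod.mk.inj (Option.some.inj h)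
        subst hk hr
        obtain ⟨r, rest', rfl⟩ : ∃ r rest', rest = r :: rest' := by
          cases rest with
          | nil => cases hg
          | cons r rest' => exact ⟨r, rest', rfl⟩
        obtain ⟨ks', rfl⟩ := pvGoB_head _ _ _ _ _ hg
        have hih := ih _ _ _ hg
        rw [pvInter_cons_cons, hih, pvInter_cons_cons]
        simp

-- length of the rejoined key list grows by the head token's length (+1 for the comma if more follow)
theorem pvLen_cons (t : List Char) (ks : List (List Char)) :
    (List.intercalate [','] (t :: ks)).length
      = t.length + (if ks = [] then 0 else 1 + (List.intercalate [','] ks).length) := by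
  cases ks with
  | nil => simp [pvInter_singleton]
  | cons k ks' => rw [pvInter_cons_cons]; simp; omega

-- MAIN: A's character scan computes exactly the position determined by B's token regrouping
theorem pvLoopA_eq (cs : List Char) : ∀ (i d : Int),
    pvLoopA cs i d
      = match pvGoB (List.splitOn ',' cs) d with
        | none => -1
        | some (ks, _) => i + ((List.intercalate [','] ks).length : Int) := by
  induction cs with
  | nil =>
    intro i d
    simp [List.splitOn, List.splitOnP, List.splitOnP.go, pvGoB, pvLoopA]
  | cons c cs' ih =>
    intro i d
    obtain ⟨t₀, ts', hts⟩ := List.exists_cons_of_ne_nil (pvSplitOn_ne_nil cs')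
    by_cases hc : c = ','
    · subst hc
      rw [pvSplitOn_comma_cons]
      have hA : pvLoopA (',' :: cs') i d = if d = 0 then i else pvLoopA cs' (i + 1) d := by
        conv_lhs => unfold pvLoopA
        rw [if_neg (by decide), if_neg (by decide)]
        by_cases hd0 : d = 0
        · rw [if_pos ⟨rfl, hd0⟩, if_pos hd0]
        · rw [if_neg (fun hh => hd0 hh.2), if_neg hd0]
      by_cases hd : d = 0
      · subst hd
        have hgo : pvGoB ([] :: List.splitOn ',' cs') 0 = some ([[]], List.splitOn ',' cs') := by
          rw [pvGoB_cons, if_pos ⟨by simp, by rw [hts]; simp⟩]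
        rw [hgo, hA, if_pos rfl]
        simp [pvInter_singleton]
      · have hgo : pvGoB ([] :: List.splitOn ',' cs') d
            = match pvGoB (List.splitOn ',' cs') d with
              | none => none
              | some (ks, rs) => some ([] :: ks, rs) := by
          rw [pvGoB_cons, if_neg (by simp [hd])]
          simp
        rw [hgo, hA, if_neg hd, ih (i + 1) d]
        cases hg : pvGoB (List.splitOn ',' cs') d with
        | none => simp
        | some p =>
          obtain ⟨ks, rs⟩ := p
          rw [hts] at hg
          obtain ⟨ks', rfl⟩ := pvGoB_head _ _ _ _ _ hg
          simp only []
          rw [pvLen_cons [] (t₀ :: ks')]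
          push_cast [List.cons_ne_nil, List.length_nil]
          ring
    · rw [pvSplitOn_cons c cs' hc, hts]
      simp only [List.modifyHead]
      have hA : pvLoopA (c :: cs') i d = pvLoopA cs' (i + 1) (d + pvDelta c) := by
        conv_lhs => unfold pvLoopA
        by_cases h1 : c = '<'
        · subst h1
          rw [if_pos rfl]
          have : d + pvDelta '<' = d + 1 := by unfold pvDelta; rw [if_pos rfl, if_neg (by decide)]; ring
          rw [this]
        · rw [if_neg h1]
          by_cases h2 : c = '>'
          · subst h2
            rw [if_pos rfl]
            have : d + pvDelta '>' = d - 1 := by unfold pvDelta; rw [if_neg (by decide), if_pos rfl]; ring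
            rw [this]
          · rw [if_neg h2, if_neg (fun hh => hc hh.1)]
            have : d + pvDelta c = d := by unfold pvDelta; rw [if_neg h1, if_neg h2]; ring
            rw [this]
      rw [hA, ih (i + 1) (d + pvDelta c), hts, pvGoB_cons_char]
      cases hg : pvGoB (t₀ :: ts') (d + pvDelta c) with
      | none => simp
      | some p =>
        obtain ⟨ks, rs⟩ := p
        obtain ⟨ks', rfl⟩ := pvGoB_head _ _ _ _ _ hg
        simp only [Option.map_some, List.modifyHead]
        rw [pvLen_cons (c :: t₀) ks', pvLen_cons t₀ ks']
        split_ifs <;> push_cast [List.length_cons] <;> ring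

-- ===== VERDICT (by name: the statement is the Claim_ definition above) =====
theorem split_map_key_value_py_spec : Claim_equal_split_map_key_value_py := by
  intro content _
  unfold Spec_split_map_key_value_py split_map_key_value_py split_map_key_value_py_alt
  simp only [pvLoopA_eq content.toList 0 0]
  cases hg : pvGoB (List.splitOn ',' content.toList) 0 with
  | none => simp
  | some p =>
    obtain ⟨ks, rs⟩ := p
    simp only []
    have hcs : content.toList
        = List.intercalate [','] ks ++ ',' :: List.intercalate [','] rs := by
      rw [← pvGoB_join _ _ _ _ hg]
      exact (List.intercalate_splitOn content.toList ',').symm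
    have hK : PySem.Chars.join [','] ks = List.intercalate [','] ks := by
      simp [PySem.Chars.join]
    have hV : PySem.Chars.join [','] rs = List.intercalate [','] rs := by
      simp [PySem.Chars.join]
    have hne : ¬ ((0 : Int) + ((List.intercalate [','] ks).length : Int) = -1) := by omega
    rw [if_neg hne, hK, hV]
    have h1 : PySem.Str.strip (PySem.Str.slice content none (some (0 + ((List.intercalate [','] ks).length : Int))))
        = PySem.Str.strip (String.ofList (List.intercalate [','] ks)) := by
      apply String.toList_inj.mp
      rw [PySem.Str.toList_strip, PySem.Str.toList_strip]
      apply congrArg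
      rw [PySem.Str.toList_slice, PySem.Chars.slice_eq_listSlice, zero_add,
        PySem.List.slice_to_natCast, hcs]
      simp [String.toList_ofList]
    have h2 : PySem.Str.strip (PySem.Str.slice content (some (0 + ((List.intercalate [','] ks).length : Int) + 1)) none)
        = PySem.Str.strip (String.ofList (List.intercalate [','] rs)) := by
      apply String.toList_inj.mp
      rw [PySem.Str.toList_strip, PySem.Str.toList_strip]
      apply congrArg
      have hb : (0 : Int) + ((List.intercalate [','] ks).length : Int) + 1
          = (((List.intercalate [','] ks).length + 1 : Nat) : Int) := by push_cast; ring
      rw [PySem.Str.toList_slice, PySem.Chars.slice_eq_listSlice, hb,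
        PySem.List.slice_from_natCast, hcs]
      rw [show List.intercalate [','] ks ++ ',' :: List.intercalate [','] rs
            = (List.intercalate [','] ks ++ [',']) ++ List.intercalate [','] rs by simp]
      rw [List.drop_left' (by simp), String.toList_ofList]
    rw [h1, h2]
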